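-- pv_equiv track=rewrite | github.com/0install/0install | zeroinstall/support/__init__.py | windows_args_escape
-- ===== SOURCE A (Python) =====
-- def windows_args_escape(args):
-- 	"""Combines multiple strings into one for use as a Windows command-line argument.
-- 	This coressponds to Windows' handling of command-line arguments as specified in: http://msdn.microsoft.com/library/17w5ykft.
-- 	@since: 1.11"""
-- 	def _escape(arg):
-- 		# Add leading quotation mark if there are whitespaces
-- 		import string
-- 		contains_whitespace = any(whitespace in arg for whitespace in string.whitespace)
-- 		result = '"' if contains_whitespace else ''
--
-- 		# Split by quotation marks
-- 		parts = arg.split('"')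
-- 		for i, part in enumerate(parts):
-- 			# Count slashes preceeding the quotation mark
-- 			slashes_count = len(part) - len(part.rstrip('\\'))
--
-- 			result = result + part
-- 			if i < len(parts) - 1:
-- 				# Not last part
-- 				result = result + ("\\" * slashes_count) # Double number of slashes
-- 				result = result + "\\" + '"' # Escaped quotation mark
-- 			elif contains_whitespace:
-- 				# Last part if there are whitespaces
-- 				result = result + ("\\" * slashes_count) # Double number of slashes
-- 				result = result + '"' # Non-escaped quotation mark
--
-- 		return result
--
-- 	return ' '.join(map(_escape, args))
-- ===== SOURCE B (Python) =====
-- import string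
--
-- def windows_args_escape(args):
-- 	"""Combines multiple strings into one for use as a Windows command-line argument."""
-- 	def _escape(arg):
-- 		quote = any(c in string.whitespace for c in arg)
-- 		out = ['"'] if quote else []
-- 		bs = 0
-- 		for c in arg:
-- 			if c == '\\':
-- 				bs += 1
-- 			elif c == '"':
-- 				out.append('\\' * (bs * 2 + 1) + '"')
-- 				bs = 0
-- 			else:
-- 				out.append('\\' * bs + c)
-- 				bs = 0
-- 		out.append('\\' * (bs * 2) + '"' if quote else '\\' * bs)
-- 		return ''.join(out)
--
-- 	return ' '.join(map(_escape, args))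
-- ===== Notes on version B (the rewrite author's own statement) =====
-- stated objective: idiomatic
-- what changed: Replaced the split-on-quote pass with per-part rstrip-based backslash recounting by a single left-to-right list2cmdline-style scan over the characters that maintains a pending-backslash run counter.
import Mathlib
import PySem

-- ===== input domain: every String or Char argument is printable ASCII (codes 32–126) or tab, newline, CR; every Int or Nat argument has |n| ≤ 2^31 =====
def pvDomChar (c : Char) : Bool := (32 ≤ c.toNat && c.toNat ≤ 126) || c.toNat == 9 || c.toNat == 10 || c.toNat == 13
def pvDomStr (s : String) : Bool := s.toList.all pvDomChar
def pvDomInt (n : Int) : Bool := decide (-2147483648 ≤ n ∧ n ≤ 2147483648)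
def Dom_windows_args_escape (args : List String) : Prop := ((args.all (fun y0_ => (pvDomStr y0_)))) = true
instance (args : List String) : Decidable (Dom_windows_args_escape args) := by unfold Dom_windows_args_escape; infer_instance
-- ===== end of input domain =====

-- B replaces A's split-on-'"' pass with per-part rstrip recounting by one left-to-right scan keeping a pending-backslash counter; same return value.

-- ===== PORT A =====
def pvWS : List Char := [' ', '\t', '\n', '\r', '\x0b', '\x0c']

-- rstrip('\\') has no PySem primitive; len(part) - len(part.rstrip('\\')) ported by hand (exact)
def pvSlashesCount (part : List Char) : Nat :=
  part.length - ((part.reverse.dropWhile (fun c => c == '\\')).reverse).length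

def pvEscapeA (arg : List Char) : List Char :=
  let contains_whitespace := pvWS.any (fun w => PySem.Chars.isIn [w] arg)
  let result : List Char := if contains_whitespace then ['"'] else []
  let parts := PySem.Chars.splitOn arg ['"']
  (PySem.List.enumerate parts).foldl (fun result ip =>
      let slashes_count := pvSlashesCount ip.2
      let result := result ++ ip.2
      if ip.1 < (parts.length : Int) - 1 then
        result ++ List.replicate slashes_count '\\' ++ ['\\', '"']
      else if contains_whitespace then
        result ++ List.replicate slashes_count '\\' ++ ['"']
      else result) result

def windows_args_escape (args : List String) : String :=
  PySem.Str.join " " (args.map (fun arg => String.ofList (pvEscapeA arg.toList)))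

-- ===== PORT B =====
def pvEscB (quote : Bool) : List Char → Nat → List Char
  | [], bs => if quote then List.replicate (bs * 2) '\\' ++ ['"'] else List.replicate bs '\\'
  | c :: cs, bs =>
    if c = '\\' then pvEscB quote cs (bs + 1)
    else if c = '"' then List.replicate (bs * 2 + 1) '\\' ++ '"' :: pvEscB quote cs 0
    else List.replicate bs '\\' ++ c :: pvEscB quote cs 0

def pvEscapeB (arg : List Char) : List Char :=
  let quote := arg.any (fun c => PySem.Chars.isIn [c] pvWS)
  (if quote then ['"'] else []) ++ pvEscB quote arg 0

def windows_args_escape_alt (args : List String) : String :=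
  PySem.Str.join " " (args.map (fun arg => String.ofList (pvEscapeB arg.toList)))

-- ===== PRECONDITION & SPEC =====
def Spec_windows_args_escape (args : List String) (out : String) : Prop := out = windows_args_escape_alt args
instance (args : List String) (out : String) : Decidable (Spec_windows_args_escape args out) := by unfold Spec_windows_args_escape; infer_instance

-- ===== CLAIM (what is proved, stated in full; the proofs are below) =====
def Claim_equal_windows_args_escape : Prop := ∀ (args : List String), Dom_windows_args_escape args → Spec_windows_args_escape args (windows_args_escape args)

-- ===== LEMMAS AND PROOFS =====

-- trailing-backslash count, the form the proofs use
def pvTrail (p : List Char) : Nat := (p.reverse.takeWhile (fun c => c == '\\')).length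

-- structural recursion computing arg.split('"')
def pvSplit : List Char → List (List Char)
  | [] => [[]]
  | c :: cs => if c = '"' then [] :: pvSplit cs else (pvSplit cs).modifyHead (c :: ·)

-- the common shape both escapes reduce to, over the quote-free parts
def pvGo (quote : Bool) : List (List Char) → List Char
  | [] => []
  | [p] => p ++ (if quote then List.replicate (pvTrail p) '\\' ++ ['"'] else [])
  | p :: q :: ps => p ++ List.replicate (pvTrail p) '\\' ++ ['\\', '"'] ++ pvGo quote (q :: ps)

lemma pvSlashesCount_eq (p : List Char) : pvSlashesCount p = pvTrail p := by
  unfold pvSlashesCount pvTrail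
  have h : (p.reverse.takeWhile (fun c => c == '\\')) ++ (p.reverse.dropWhile (fun c => c == '\\')) = p.reverse :=
    List.takeWhile_append_dropWhile
  have h3 := congrArg List.length h
  simp only [List.length_append, List.length_reverse] at *
  omega

lemma pvTrail_replicate (k : Nat) : pvTrail (List.replicate k '\\') = k := by
  unfold pvTrail
  rw [List.reverse_replicate, List.takeWhile_replicate]
  simp

lemma pvTrail_append_cons (xs ys : List Char) (c : Char) (h : c ≠ '\\') :
    pvTrail (xs ++ c :: ys) = pvTrail ys := by
  unfold pvTrail
  rw [List.reverse_append, List.reverse_cons, List.append_assoc, List.takeWhile_append]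
  have hc : List.takeWhile (fun c_1 => c_1 == '\\') ([c] ++ xs.reverse) = [] := by
    simp [h]
  split
  · rw [hc, List.append_nil]; simp only [List.length_reverse] at *; omega
  · rfl

lemma pvSplit_ne_nil (cs : List Char) : pvSplit cs ≠ [] := by
  induction cs with
  | nil => simp [pvSplit]
  | cons c cs ih =>
    simp only [pvSplit]
    split
    · simp
    · cases h : pvSplit cs with
      | nil => exact absurd h ih
      | cons p ps => simp

lemma pvSplitOn_go_eq (fuel : Nat) : ∀ (l cur : List Char) (acc : List (List Char)),
    l.length < fuel →
    PySem.Chars.splitOn.go ['"'] fuel l cur acc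
      = acc.reverse ++ (pvSplit l).modifyHead (cur.reverse ++ ·) := by
  induction fuel with
  | zero => intro l cur acc h; omega
  | succ n ih =>
    intro l cur acc h
    cases l with
    | nil => simp [PySem.Chars.splitOn.go, pvSplit]
    | cons c rest =>
      rw [PySem.Chars.splitOn.go]
      by_cases hc : c = '"'
      · subst hc
        have hpre : List.isPrefixOf ['"'] ('"' :: rest) = true := by simp [List.isPrefixOf]
        rw [if_pos hpre]
        simp only [List.length_cons] at h
        rw [ih _ _ _ (by simpa using Nat.lt_of_succ_lt_succ h)]
        simp only [pvSplit]
        cases hs : pvSplit rest with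
        | nil => exact absurd hs (pvSplit_ne_nil rest)
        | cons p ps => simp [hs]
      · have hpre : List.isPrefixOf ['"'] (c :: rest) = false := by
          simp [List.isPrefixOf]; exact fun hh => hc hh.symm
        rw [if_neg (by simp [hpre])]
        simp only [List.length_cons] at h
        rw [ih _ _ _ (Nat.lt_of_succ_lt_succ h)]
        simp only [pvSplit, if_neg hc]
        cases hs : pvSplit rest with
        | nil => exact absurd hs (pvSplit_ne_nil rest)
        | cons p ps => simp [List.modifyHead, List.reverse_cons, List.append_assoc]

lemma pvSplitOn_eq (cs : List Char) : PySem.Chars.splitOn cs ['"'] = pvSplit cs := by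
  rw [PySem.Chars.splitOn, pvSplitOn_go_eq _ _ _ _ (by omega)]
  cases h : pvSplit cs <;> simp

lemma pvReplicate_append_cons (k : Nat) (l : List Char) :
    List.replicate k '\\' ++ '\\' :: l = List.replicate (k + 1) '\\' ++ l := by
  rw [List.replicate_succ', List.append_assoc]; rfl

lemma pvEscB_eq_go (quote : Bool) (cs : List Char) : ∀ (k : Nat),
    pvEscB quote cs k = pvGo quote ((pvSplit cs).modifyHead (List.replicate k '\\' ++ ·)) := by
  induction cs with
  | nil =>
    intro k
    simp only [pvEscB, pvSplit, List.modifyHead, pvGo]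
    cases quote with
    | false => simp
    | true =>
      simp [pvTrail_replicate]
      rw [← List.append_assoc, List.replicate_append_replicate,
        show k + k = k * 2 from by omega]
  | cons c cs ih =>
    intro k
    by_cases hbs : c = '\\'
    · subst hbs
      rw [pvEscB]
      rw [ih (k+1)]
      simp only [pvSplit, if_neg (by decide : ¬('\\' = '"'))]
      cases hs : pvSplit cs with
      | nil => exact absurd hs (pvSplit_ne_nil cs)
      | cons p ps => simp [pvReplicate_append_cons]
    · by_cases hq : c = '"'
      · subst hq
        rw [pvEscB]
        simp only [if_neg (by decide : ¬('"' = '\\'))]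
        rw [ih 0]
        simp only [pvSplit]
        cases hs : pvSplit cs with
        | nil => exact absurd hs (pvSplit_ne_nil cs)
        | cons p ps =>
          simp only [List.modifyHead]
          cases ps <;>
            · simp [pvGo, pvTrail_replicate, show k * 2 + 1 = (k + k) + 1 from by omega,
                List.replicate_succ', List.append_assoc]
      · rw [pvEscB]
        simp only [if_neg hbs, if_neg hq]
        rw [ih 0]
        simp only [pvSplit, if_neg hq]
        cases hs : pvSplit cs with
        | nil => exact absurd hs (pvSplit_ne_nil cs)
        | cons p ps =>
          simp only [List.modifyHead]
          cases ps with
          | nil =>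
            simp only [pvGo]
            rw [pvTrail_append_cons (List.replicate k '\\') p c hbs]
            cases quote <;> simp
          | cons q qs =>
            simp only [pvGo]
            rw [pvTrail_append_cons (List.replicate k '\\') p c hbs]
            simp

lemma pvFoldA (quote : Bool) (N : Int) :
    ∀ (ps : List (List Char)) (i0 : Int) (acc : List Char), ps ≠ [] → i0 + ps.length = N →
    (PySem.List.enumerate ps i0).foldl (fun result ip =>
      let slashes_count := pvSlashesCount ip.2
      let result := result ++ ip.2
      if ip.1 < N - 1 then
        result ++ List.replicate slashes_count '\\' ++ ['\\', '"']
      else if quote then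
        result ++ List.replicate slashes_count '\\' ++ ['"']
      else result) acc = acc ++ pvGo quote ps := by
  intro ps
  induction ps with
  | nil => intro i0 acc h; exact absurd rfl h
  | cons p ps ih =>
    intro i0 acc _ hN
    rw [PySem.List.enumerate_cons, List.foldl_cons]
    cases ps with
    | nil =>
      have hlt : ¬ (i0 < N - 1) := by simp at hN; omega
      simp only [PySem.List.enumerate_nil, List.foldl_nil, if_neg hlt, pvGo,
        pvSlashesCount_eq]
      cases quote <;> simp [List.append_assoc]
    | cons q qs =>
      have hlt : i0 < N - 1 := by
        simp only [List.length_cons] at hN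
        push_cast at hN
        omega
      rw [ih (i0 + 1) _ (by simp) (by simp only [List.length_cons] at hN ⊢; push_cast at hN ⊢; omega)]
      simp only [if_pos hlt, pvSlashesCount_eq, pvGo]
      simp [List.append_assoc]

lemma pvQuote_eq (arg : List Char) :
    pvWS.any (fun w => PySem.Chars.isIn [w] arg) = arg.any (fun c => PySem.Chars.isIn [c] pvWS) := by
  rw [Bool.eq_iff_iff]
  simp only [List.any_eq_true, PySem.Chars.isIn_iff_infix, List.singleton_infix_iff]
  exact ⟨fun ⟨w, hw, ha⟩ => ⟨w, ha, hw⟩, fun ⟨c, hc, hw⟩ => ⟨c, hw, hc⟩⟩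

lemma pvEscape_eq (arg : List Char) : pvEscapeA arg = pvEscapeB arg := by
  unfold pvEscapeA pvEscapeB
  dsimp only
  rw [pvQuote_eq]
  rw [pvSplitOn_eq]
  rw [pvFoldA _ ((pvSplit arg).length : Int) (pvSplit arg) 0 _ (pvSplit_ne_nil arg) (by simp)]
  rw [pvEscB_eq_go]
  congr 1
  cases hs : pvSplit arg with
  | nil => exact absurd hs (pvSplit_ne_nil arg)
  | cons p ps => simp

-- ===== VERDICT (by name: the statement is the Claim_ definition above) =====
theorem windows_args_escape_spec : Claim_equal_windows_args_escape := by
  intro args _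
  unfold Spec_windows_args_escape windows_args_escape windows_args_escape_alt
  simp [pvEscape_eq]
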